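-- pv_equiv track=rewrite | github.com/FHIR-IQ/Symphony | backend/app/routers/ingest.py | ensure_patient_first
-- ===== SOURCE A (Python) =====
-- from typing import List, Dict, Any, Optional
--
-- def ensure_patient_first(entries: List[Dict[str, Any]]) -> List[Dict[str, Any]]:
--     """Ensure Patient resource is first in the bundle entries."""
--     patient_entries = []
--     other_entries = []
--
--     for entry in entries:
--         resource = entry.get("resource", {})
--         if resource.get("resourceType") == "Patient":
--             patient_entries.append(entry)
--         else:
--             other_entries.append(entry)
--
--     return patient_entries + other_entries
-- ===== SOURCE B (Python) =====
-- from typing import List, Dict, Any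
--
-- def ensure_patient_first(entries: List[Dict[str, Any]]) -> List[Dict[str, Any]]:
--     """Ensure Patient resource is first in the bundle entries."""
--     return sorted(entries, key=lambda e: e.get("resource", {}).get("resourceType") != "Patient")
-- ===== Notes on version B (the rewrite author's own statement) =====
-- stated objective: idiomatic
-- what changed: Replaces the manual two-list partition-and-concatenate loop with a single stable sort on a boolean key (non-Patient sorts after Patient), relying on sort stability to preserve order within each group.
import Mathlib
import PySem

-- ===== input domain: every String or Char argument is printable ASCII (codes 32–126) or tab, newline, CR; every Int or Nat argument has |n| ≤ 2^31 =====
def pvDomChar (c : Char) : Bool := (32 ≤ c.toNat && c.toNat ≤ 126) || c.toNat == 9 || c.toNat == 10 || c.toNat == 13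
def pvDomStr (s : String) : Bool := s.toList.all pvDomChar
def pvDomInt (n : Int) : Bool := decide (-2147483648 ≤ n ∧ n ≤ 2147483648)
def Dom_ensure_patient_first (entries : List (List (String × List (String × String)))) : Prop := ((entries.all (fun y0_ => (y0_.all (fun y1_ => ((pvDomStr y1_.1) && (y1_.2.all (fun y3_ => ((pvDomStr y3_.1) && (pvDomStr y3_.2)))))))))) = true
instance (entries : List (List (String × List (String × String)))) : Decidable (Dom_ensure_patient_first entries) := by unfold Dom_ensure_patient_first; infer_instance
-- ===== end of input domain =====

-- B replaces A's manual two-list partition with one stable sort on a boolean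
-- "is not a Patient" key (idiomatic; sort stability preserves order within each group).


-- ===== PORT A =====
-- Literal port: one pass appending each entry to patient_entries or other_entries,
-- then patient_entries ++ other_entries.
def ensure_patient_first (entries : List (List (String × List (String × String)))) : List (List (String × List (String × String))) :=
  let acc := entries.foldl
    (fun (acc : List (List (String × List (String × String))) × List (List (String × List (String × String)))) entry =>
      let resource := PySem.Dict.getD (PySem.Dict.mk entry) "resource" []
      if PySem.Dict.get? (PySem.Dict.mk resource) "resourceType" == some "Patient" then
        (acc.1 ++ [entry], acc.2)
      else
        (acc.1, acc.2 ++ [entry]))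
    ([], [])
  acc.1 ++ acc.2

-- ===== PORT B =====
-- key=lambda e: e.get("resource", {}).get("resourceType") != "Patient"
def epfKey (entry : List (String × List (String × String))) : Bool :=
  !(PySem.Dict.get? (PySem.Dict.mk (PySem.Dict.getD (PySem.Dict.mk entry) "resource" ([] : List (String × String)))) "resourceType" == some "Patient")

def ensure_patient_first_alt (entries : List (List (String × List (String × String)))) : List (List (String × List (String × String))) :=
  PySem.List.sorted entries epfKey

-- ===== PRECONDITION & SPEC =====
def Spec_ensure_patient_first (entries : List (List (String × List (String × String)))) (out : List (List (String × List (String × String)))) : Prop := out = ensure_patient_first_alt entries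
instance (entries : List (List (String × List (String × String)))) (out : List (List (String × List (String × String)))) : Decidable (Spec_ensure_patient_first entries out) := by unfold Spec_ensure_patient_first; infer_instance

-- ===== CLAIM (what is proved, stated in full; the proofs are below) =====
def Claim_equal_ensure_patient_first : Prop := ∀ (entries : List (List (String × List (String × String)))), Dom_ensure_patient_first entries → Spec_ensure_patient_first entries (ensure_patient_first entries)

-- ===== LEMMAS AND PROOFS =====

-- Inserting x whose key is ≥ every key in ls and < every key in ts lands exactly between them.
theorem insertBy_between {α : Type} (before : α → α → Bool) (x : α) (ls ts : List α)
    (hl : ∀ y ∈ ls, before x y = false) (ht : ∀ y ∈ ts, before x y = true) :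
    PySem.List.insertBy before x (ls ++ ts) = ls ++ x :: ts := by
  induction ls with
  | nil =>
    cases ts with
    | nil => simp [PySem.List.insertBy]
    | cons t ts' => simp [PySem.List.insertBy, ht t (by simp)]
  | cons l ls' ih =>
    have h1 : before x l = false := hl l (by simp)
    simp only [List.cons_append, PySem.List.insertBy, h1]
    simp [ih (fun y hy => hl y (by simp [hy]))]

-- A stable sort on a Bool key is exactly the stable partition: false-key elements
-- (in order) followed by true-key elements (in order).
theorem sorted_bool_eq_partition {α : Type} (key : α → Bool) (xs : List α) :
    PySem.List.sorted xs key = xs.filter (fun x => !key x) ++ xs.filter key := by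
  rw [PySem.List.sorted_eq_foldl_insertBy]
  suffices h : ∀ (xs ffs tts : List α), (∀ y ∈ ffs, key y = false) → (∀ y ∈ tts, key y = true) →
      List.foldl (fun acc x => PySem.List.insertBy (fun a b => decide (key a < key b)) x acc) (ffs ++ tts) xs
      = (ffs ++ xs.filter (fun x => !key x)) ++ (tts ++ xs.filter key) by
    simpa using h xs [] [] (by simp) (by simp)
  intro xs
  induction xs with
  | nil => intro ffs tts _ _; simp
  | cons x xs' ih =>
    intro ffs tts hf htt
    simp only [List.foldl_cons]
    cases hx : key x with
    | false =>
      have hstep : PySem.List.insertBy (fun a b => decide (key a < key b)) x (ffs ++ tts)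
          = ffs ++ x :: tts := by
        apply insertBy_between
        · intro y hy; simp [hx, hf y hy]
        · intro y hy; simp [hx, htt y hy]
      rw [hstep]
      have := ih (ffs ++ [x]) tts
        (by intro y hy; rcases List.mem_append.1 hy with h | h
            · exact hf y h
            · simp at h; simp [h, hx]) htt
      simpa [List.filter, hx] using this
    | true =>
      have hstep : PySem.List.insertBy (fun a b => decide (key a < key b)) x (ffs ++ tts)
          = (ffs ++ tts) ++ [x] := by
        apply PySem.List.insertBy_of_forall_not_before
        intro y hy; simp [hx]
      rw [hstep, List.append_assoc]
      have := ih ffs (tts ++ [x]) hf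
        (by intro y hy; rcases List.mem_append.1 hy with h | h
            · exact htt y h
            · simp at h; simp [h, hx])
      simpa [List.filter, hx] using this
  -- (no reverse flag is involved: PySem.List.sorted defaults to reverse = false)

-- A's fold is the pair (processed patients, processed others).
theorem ensure_foldl_inv (xs p o : List (List (String × List (String × String)))) :
    List.foldl
      (fun (acc : List (List (String × List (String × String))) × List (List (String × List (String × String)))) entry =>
        let resource := PySem.Dict.getD (PySem.Dict.mk entry) "resource" []
        if PySem.Dict.get? (PySem.Dict.mk resource) "resourceType" == some "Patient" then
          (acc.1 ++ [entry], acc.2)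
        else
          (acc.1, acc.2 ++ [entry])) (p, o) xs
    = (p ++ xs.filter (fun x => !epfKey x), o ++ xs.filter epfKey) := by
  induction xs generalizing p o with
  | nil => simp
  | cons x xs' ih =>
    simp only [List.foldl_cons]
    by_cases hx : PySem.Dict.get? (PySem.Dict.mk (PySem.Dict.getD (PySem.Dict.mk x) "resource" [])) "resourceType" == some "Patient"
    · simp only [hx, if_pos, ih]
      simp [List.filter, epfKey, hx]
    · rw [if_neg (by simpa using hx), ih]
      simp [List.filter, epfKey, hx]

-- ===== VERDICT (by name: the statement is the Claim_ definition above) =====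
theorem ensure_patient_first_spec : Claim_equal_ensure_patient_first := by
  intro entries _
  unfold Spec_ensure_patient_first ensure_patient_first ensure_patient_first_alt
  rw [sorted_bool_eq_partition, ensure_foldl_inv]
  simp
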